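-- pv_equiv track=rewrite | github.com/terrene-foundation/kailash-py | packages/kailash-kaizen/src/kaizen/signatures/core.py | _detect_input_types
-- ===== SOURCE A (Python) =====
-- from typing import Any, Callable, ClassVar, Dict, List, Optional, Tuple, Union
--
-- def _detect_input_types(inputs: List[str]) -> Dict[str, str]:
--     """Detect input types based on parameter names."""
--     input_types = {}
--     for input_name in inputs:
--         if any(
--             keyword in input_name.lower()
--             for keyword in ["image", "img", "picture", "photo"]
--         ):
--             input_types[input_name] = "image"
--         elif any(
--             keyword in input_name.lower()
--             for keyword in ["audio", "sound", "speech", "voice"]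
--         ):
--             input_types[input_name] = "audio"
--         elif any(
--             keyword in input_name.lower() for keyword in ["video", "clip", "movie"]
--         ):
--             input_types[input_name] = "video"
--         else:
--             input_types[input_name] = "text"
--     return input_types
-- ===== SOURCE B (Python) =====
-- _PASSES = [
--     ("video", ["video", "clip", "movie"]),
--     ("audio", ["audio", "sound", "speech", "voice"]),
--     ("image", ["image", "img", "picture", "photo"]),
-- ]
--
-- def _detect_input_types(inputs):
--     """Detect input types based on parameter names."""
--     # Staged overwrite passes: default everything to "text", then sweep the
--     # categories in reverse priority order so a later (higher-priority) pass
--     # overwrites an earlier match; dict positions are fixed by the first pass.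
--     types = {name: "text" for name in inputs}
--     for media, keywords in _PASSES:
--         for name in inputs:
--             low = name.lower()
--             if any(kw in low for kw in keywords):
--                 types[name] = media
--     return types
-- ===== Notes on version B (the rewrite author's own statement) =====
-- stated objective: alternative
-- what changed: Instead of classifying each name with an if/elif chain in one pass, B first defaults every name to 'text', then makes one overwrite sweep per category in reverse priority order (video, audio, image), so later sweeps overwrite earlier matches and priority falls out of pass order rather than branch order.
import Mathlib
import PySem

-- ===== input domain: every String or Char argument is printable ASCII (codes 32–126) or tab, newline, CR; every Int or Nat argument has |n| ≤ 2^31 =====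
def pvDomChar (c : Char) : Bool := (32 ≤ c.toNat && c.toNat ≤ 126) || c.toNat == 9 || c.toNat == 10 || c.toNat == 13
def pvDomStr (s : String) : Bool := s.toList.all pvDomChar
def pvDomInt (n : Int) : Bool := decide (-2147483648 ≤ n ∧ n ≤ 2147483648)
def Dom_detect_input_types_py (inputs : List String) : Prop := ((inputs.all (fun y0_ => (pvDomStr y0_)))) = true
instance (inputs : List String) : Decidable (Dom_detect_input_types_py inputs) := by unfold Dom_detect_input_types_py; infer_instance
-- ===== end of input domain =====

-- B replaces A's per-name if/elif chain by staged overwrite passes: default all names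
-- to "text", then sweep categories in reverse priority so later passes overwrite (alternative decomposition).

-- ===== PORT A =====
def detect_input_types_py (inputs : List String) : List (String × String) :=
  (inputs.foldl (fun (input_types : PySem.Dict String String) input_name =>
      if ["image", "img", "picture", "photo"].any
           (fun keyword => PySem.Str.isIn keyword (PySem.Str.lower input_name)) then
        input_types.insert input_name "image"
      else if ["audio", "sound", "speech", "voice"].any
           (fun keyword => PySem.Str.isIn keyword (PySem.Str.lower input_name)) then
        input_types.insert input_name "audio"
      else if ["video", "clip", "movie"].any
           (fun keyword => PySem.Str.isIn keyword (PySem.Str.lower input_name)) then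
        input_types.insert input_name "video"
      else
        input_types.insert input_name "text")
    PySem.Dict.empty).items

-- ===== PORT B =====
def pvPasses : List (String × List String) :=
  [("video", ["video", "clip", "movie"]),
   ("audio", ["audio", "sound", "speech", "voice"]),
   ("image", ["image", "img", "picture", "photo"])]

def detect_input_types_py_alt (inputs : List String) : List (String × String) :=
  (pvPasses.foldl
    (fun (types : PySem.Dict String String) p =>
      inputs.foldl
        (fun (types : PySem.Dict String String) name =>
          let low := PySem.Str.lower name
          if p.2.any (fun kw => PySem.Str.isIn kw low) then types.insert name p.1
          else types)
        types)
    (inputs.foldl (fun (d : PySem.Dict String String) name => d.insert name "text")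
      PySem.Dict.empty)).items

-- ===== PRECONDITION & SPEC =====
def Spec_detect_input_types_py (inputs : List String) (out : List (String × String)) : Prop := out = detect_input_types_py_alt inputs
instance (inputs : List String) (out : List (String × String)) : Decidable (Spec_detect_input_types_py inputs out) := by unfold Spec_detect_input_types_py; infer_instance

-- ===== CLAIM (what is proved, stated in full; the proofs are below) =====
def Claim_equal_detect_input_types_py : Prop := ∀ (inputs : List String), Dom_detect_input_types_py inputs → Spec_detect_input_types_py inputs (detect_input_types_py inputs)

-- ===== LEMMAS AND PROOFS =====

-- match test for a keyword list
def pvMatch (kws : List String) (name : String) : Bool :=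
  kws.any (fun kw => PySem.Str.isIn kw (PySem.Str.lower name))

-- A's per-name classification value
def pvGA (name : String) : String :=
  if pvMatch ["image", "img", "picture", "photo"] name then "image"
  else if pvMatch ["audio", "sound", "speech", "voice"] name then "audio"
  else if pvMatch ["video", "clip", "movie"] name then "video"
  else "text"

lemma get?_insert_fold (h : String → String) :
    ∀ (l : List String) (d : PySem.Dict String String) (k : String),
      (l.foldl (fun d n => d.insert n (h n)) d).get? k
        = if k ∈ l then some (h k) else d.get? k := by
  intro l
  induction l with
  | nil => intro d k; simp
  | cons x xs ih =>
    intro d k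
    simp only [List.foldl_cons, ih, List.mem_cons]
    by_cases hk : k = x
    · subst hk
      by_cases hx : k ∈ xs <;> simp [hx, PySem.Dict.get?_insert_self]
    · by_cases hx : k ∈ xs <;> simp [hx, hk, PySem.Dict.get?_insert_of_ne _ _ hk]

lemma get?_pass_fold (m : String → Bool) (t : String) :
    ∀ (l : List String) (d : PySem.Dict String String) (k : String),
      (l.foldl (fun d n => if m n then d.insert n t else d) d).get? k
        = if k ∈ l ∧ m k then some t else d.get? k := by
  intro l
  induction l with
  | nil => intro d k; simp
  | cons x xs ih =>
    intro d k
    simp only [List.foldl_cons, List.mem_cons]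
    by_cases hmx : m x
    · simp only [hmx, if_true, ih]
      by_cases hk : k = x
      · subst hk
        by_cases hx : k ∈ xs ∧ m k <;>
          simp_all [PySem.Dict.get?_insert_self]
      · by_cases hx : k ∈ xs ∧ m k <;>
          simp_all [PySem.Dict.get?_insert_of_ne _ _ hk]
    · simp only [hmx, ih]
      by_cases hk : k = x
      · subst hk; simp [hmx]
      · by_cases hx : k ∈ xs ∧ m k <;> simp_all

lemma keys_pass_fold (m : String → Bool) (t : String) :
    ∀ (l : List String) (d : PySem.Dict String String),
      (∀ n ∈ l, d.contains n = true) →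
      (l.foldl (fun d n => if m n then d.insert n t else d) d).keys = d.keys := by
  intro l
  induction l with
  | nil => intro d _; rfl
  | cons x xs ih =>
    intro d hc
    simp only [List.foldl_cons]
    by_cases hmx : m x
    · simp only [hmx, if_true]
      rw [ih]
      · exact PySem.Dict.keys_insert_of_contains _ _ (hc x (List.mem_cons_self ..))
      · intro n hn
        rw [PySem.Dict.contains_insert]
        simp [hc n (List.mem_cons_of_mem _ hn)]
    · simp only [hmx]
      exact ih d (fun n hn => hc n (List.mem_cons_of_mem _ hn))

lemma contains_of_mem_keys (d : PySem.Dict String String) (k : String)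
    (h : k ∈ d.keys) : d.contains k = true :=
  (PySem.Dict.contains_iff_mem_keys ..).mpr h

-- the dict B builds, as get?/keys facts
lemma alt_dict_eq (inputs : List String) :
    (pvPasses.foldl
      (fun (types : PySem.Dict String String) p =>
        inputs.foldl
          (fun (types : PySem.Dict String String) name =>
            let low := PySem.Str.lower name
            if p.2.any (fun kw => PySem.Str.isIn kw low) then types.insert name p.1
            else types)
          types)
      (inputs.foldl (fun (d : PySem.Dict String String) name => d.insert name "text")
        PySem.Dict.empty))
    = inputs.foldl (fun d n => d.insert n (pvGA n)) PySem.Dict.empty := by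
  set D0 : PySem.Dict String String :=
    inputs.foldl (fun d n => d.insert n "text") PySem.Dict.empty with hD0
  have hD0keys : ∀ n ∈ inputs, D0.contains n = true := by
    intro n hn
    rw [PySem.Dict.contains_eq_isSome_get?, hD0,
      get?_insert_fold (fun _ => "text") inputs PySem.Dict.empty n]
    simp [hn]
  -- unfold the three passes
  simp only [pvPasses, List.foldl_cons, List.foldl_nil]
  set mV := pvMatch ["video", "clip", "movie"] with hmV
  set mA := pvMatch ["audio", "sound", "speech", "voice"] with hmA
  set mI := pvMatch ["image", "img", "picture", "photo"] with hmI
  have e1 : (fun (types : PySem.Dict String String) (name : String) =>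
      if ["video", "clip", "movie"].any (fun kw => PySem.Str.isIn kw (PySem.Str.lower name))
      then types.insert name "video" else types)
      = fun d n => if mV n then d.insert n "video" else d := by
    funext d n; simp [hmV, pvMatch]
  have e2 : (fun (types : PySem.Dict String String) (name : String) =>
      if ["audio", "sound", "speech", "voice"].any (fun kw => PySem.Str.isIn kw (PySem.Str.lower name))
      then types.insert name "audio" else types)
      = fun d n => if mA n then d.insert n "audio" else d := by
    funext d n; simp [hmA, pvMatch]
  have e3 : (fun (types : PySem.Dict String String) (name : String) =>
      if ["image", "img", "picture", "photo"].any (fun kw => PySem.Str.isIn kw (PySem.Str.lower name))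
      then types.insert name "image" else types)
      = fun d n => if mI n then d.insert n "image" else d := by
    funext d n; simp [hmI, pvMatch]
  simp only [e1, e2, e3]
  set D1 := inputs.foldl (fun d n => if mV n then d.insert n "video" else d) D0 with hD1
  set D2 := inputs.foldl (fun d n => if mA n then d.insert n "audio" else d) D1 with hD2
  set D3 := inputs.foldl (fun d n => if mI n then d.insert n "image" else d) D2 with hD3
  have k1 : D1.keys = D0.keys := keys_pass_fold mV "video" inputs D0 hD0keys
  have hD1c : ∀ n ∈ inputs, D1.contains n = true := by
    intro n hn
    exact contains_of_mem_keys _ _ (by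
      rw [k1]; exact (PySem.Dict.contains_iff_mem_keys ..).mp (hD0keys n hn))
  have k2 : D2.keys = D0.keys := by
    rw [hD2, keys_pass_fold mA "audio" inputs D1 hD1c, k1]
  have hD2c : ∀ n ∈ inputs, D2.contains n = true := by
    intro n hn
    exact contains_of_mem_keys _ _ (by
      rw [k2]; exact (PySem.Dict.contains_iff_mem_keys ..).mp (hD0keys n hn))
  have k3 : D3.keys = D0.keys := by
    rw [hD3, keys_pass_fold mI "image" inputs D2 hD2c, k2]
  -- keys of the two final dicts
  have kR : (inputs.foldl (fun d n => d.insert n (pvGA n)) PySem.Dict.empty).keys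
      = D0.keys := by
    rw [hD0, PySem.Dict.keys_foldl_insert, PySem.Dict.keys_foldl_insert]
  -- get? of the two final dicts agree
  have hget : ∀ k, D3.get? k
      = (inputs.foldl (fun d n => d.insert n (pvGA n)) PySem.Dict.empty).get? k := by
    intro k
    rw [hD3, get?_pass_fold mI "image" inputs D2 k, hD2,
      get?_pass_fold mA "audio" inputs D1 k, hD1,
      get?_pass_fold mV "video" inputs D0 k, hD0,
      get?_insert_fold (fun _ => "text") inputs PySem.Dict.empty k,
      get?_insert_fold pvGA inputs PySem.Dict.empty k]
    by_cases hk : k ∈ inputs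
    · simp only [hk, true_and, if_true, PySem.Dict.get?_empty]
      unfold pvGA
      rw [hmI, hmA, hmV]
      by_cases h1 : mI k <;> by_cases h2 : mA k <;> by_cases h3 : mV k <;>
        simp_all
    · simp [hk]
  -- nodup keys
  have hnd0 : D0.keys.Nodup := by
    rw [hD0]
    exact PySem.Dict.nodup_keys_foldl_insert _ _ _ PySem.Dict.nodup_keys_empty
  have hnd3 : D3.keys.Nodup := by rw [k3]; exact hnd0
  have hndR : (inputs.foldl (fun d n => d.insert n (pvGA n)) PySem.Dict.empty).keys.Nodup :=
    PySem.Dict.nodup_keys_foldl_insert _ _ _ PySem.Dict.nodup_keys_empty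
  -- conclude via items
  apply PySem.Dict.ext
  rw [PySem.Dict.items_eq_map_keys _ hnd3 "", PySem.Dict.items_eq_map_keys _ hndR ""]
  rw [k3, kR]
  apply List.map_congr_left
  intro k _
  simp only [Prod.mk.injEq, true_and]
  rw [PySem.Dict.getD_eq_get?_getD, PySem.Dict.getD_eq_get?_getD, hget k]

lemma a_fold_eq (inputs : List String) :
    (inputs.foldl (fun (input_types : PySem.Dict String String) input_name =>
      if ["image", "img", "picture", "photo"].any
           (fun keyword => PySem.Str.isIn keyword (PySem.Str.lower input_name)) then
        input_types.insert input_name "image"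
      else if ["audio", "sound", "speech", "voice"].any
           (fun keyword => PySem.Str.isIn keyword (PySem.Str.lower input_name)) then
        input_types.insert input_name "audio"
      else if ["video", "clip", "movie"].any
           (fun keyword => PySem.Str.isIn keyword (PySem.Str.lower input_name)) then
        input_types.insert input_name "video"
      else
        input_types.insert input_name "text") PySem.Dict.empty)
    = inputs.foldl (fun d n => d.insert n (pvGA n)) PySem.Dict.empty := by
  apply PySem.List.foldl_congr_mem
  intro d n _
  unfold pvGA pvMatch
  split_ifs <;> rfl

-- ===== VERDICT (by name: the statement is the Claim_ definition above) =====
theorem detect_input_types_py_spec : Claim_equal_detect_input_types_py := by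
  intro inputs _
  unfold Spec_detect_input_types_py detect_input_types_py detect_input_types_py_alt
  rw [a_fold_eq, alt_dict_eq]
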